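-- pv_equiv track=rewrite | github.com/josuebarrenoz/Programacion-0790 | Tareas/ejercicio156.py | respuesta_156
-- ===== SOURCE A (Python) =====
-- def respuesta_156(n,x):
--     str="123456789"
--     resultado=""
--     num = str.index(x)
--     max = int(n)
--
--     for j in range (2,int(n)+2):
--         num_i=num
--         for i in range(1,max+1):
--             resultado+=str[num_i]+" "
--             num_i = (num_i + i)%len(str)
--         num = (num+j)%len(str)
--         resultado+="\n"
--         max-=1
--
--     return resultado
-- ===== SOURCE B (Python) =====
-- def respuesta_156(n, x):
--     digits = "123456789"
--     num0 = digits.index(x)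
--     m = int(n)
--     out = []
--     for r in range(m):
--         base = num0 + (r + 1) * (r + 2) // 2 - 1
--         row = "".join(digits[(base + i * (i + 1) // 2) % 9] + " " for i in range(m - r))
--         out.append(row + "\n")
--     return "".join(out)
-- ===== Notes on version B (the rewrite author's own statement) =====
-- stated objective: alternative
-- what changed: B replaces A's two running accumulators (the per-row start digit and the in-row stepping index, each updated modulo 9) with a direct closed-form triangular-number formula for every emitted digit index, building each row independently and joining the rows.
import Mathlib
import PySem

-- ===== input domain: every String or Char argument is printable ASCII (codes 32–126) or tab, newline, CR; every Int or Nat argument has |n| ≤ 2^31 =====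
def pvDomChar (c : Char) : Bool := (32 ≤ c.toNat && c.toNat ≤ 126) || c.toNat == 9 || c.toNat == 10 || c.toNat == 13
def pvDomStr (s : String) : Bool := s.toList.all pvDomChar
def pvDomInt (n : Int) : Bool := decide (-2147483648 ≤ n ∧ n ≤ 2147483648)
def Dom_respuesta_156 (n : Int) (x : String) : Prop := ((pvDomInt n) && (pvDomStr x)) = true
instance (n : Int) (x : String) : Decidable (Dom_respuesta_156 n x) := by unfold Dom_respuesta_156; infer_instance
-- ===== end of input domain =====

-- B replaces A's two running accumulators (num, num_i) by a closed triangular-number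
-- formula for each emitted digit index (objective: alternative decomposition, same cost).

-- str[i] as a one-char list; every index reached by either port is provably in [0, 9),
-- so this is exact where the Python runs (out of range would be an IndexError, never reached).
def pvPick (digits : List Char) (i : Int) : List Char :=
  match PySem.List.pyGet? digits i with
  | some c => [c]
  | none => []

-- ===== PORT A =====
def respuesta_156 (n : Int) (x : String) : String :=
  let digits := "123456789".toList
  let num := PySem.Chars.find digits x.toList      -- str.index(x); Pre_ guarantees it is found
  let m := n                                       -- max = int(n)
  let st := (PySem.List.pyRange 2 (n + 2) 1).foldl
    (fun (st : List Char × Int × Int) j =>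
      let inner := (PySem.List.pyRange 1 (st.2.2 + 1) 1).foldl
        (fun (t : List Char × Int) i =>
          (t.1 ++ pvPick digits t.2 ++ [' '],
           PySem.Int.mod (t.2 + i) (PySem.Chars.len digits)))
        (st.1, st.2.1)
      (inner.1 ++ ['\n'],
       PySem.Int.mod (st.2.1 + j) (PySem.Chars.len digits),
       st.2.2 - 1))
    ([], num, m)
  String.ofList st.1

-- ===== PORT B =====
def respuesta_156_alt (n : Int) (x : String) : String :=
  let digits := "123456789".toList
  let num0 := PySem.Chars.find digits x.toList     -- digits.index(x)
  let m := n
  let rows := (PySem.List.pyRange 0 m 1).map (fun r =>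
    let base := num0 + PySem.Int.floordiv ((r + 1) * (r + 2)) 2 - 1
    (((PySem.List.pyRange 0 (m - r) 1).map (fun i =>
        pvPick digits (PySem.Int.mod (base + PySem.Int.floordiv (i * (i + 1)) 2) 9) ++ [' '])).flatten)
      ++ ['\n'])
  String.ofList rows.flatten                           -- "".join(out)

-- ===== PRECONDITION & SPEC =====
-- Pre_ excludes exactly the inputs where "123456789".index(x) raises ValueError:
-- x must occur as a substring of "123456789".
def Pre_respuesta_156 (n : Int) (x : String) : Prop :=
  PySem.Str.isIn x "123456789" = true
instance (n : Int) (x : String) : Decidable (Pre_respuesta_156 n x) := by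
  unfold Pre_respuesta_156; infer_instance

def pvWitness_respuesta_156 : Int × String := (4, "3")

def Spec_respuesta_156 (n : Int) (x : String) (out : String) : Prop := out = respuesta_156_alt n x
instance (n : Int) (x : String) (out : String) : Decidable (Spec_respuesta_156 n x out) := by unfold Spec_respuesta_156; infer_instance

-- ===== CLAIM (what is proved, stated in full; the proofs are below) =====
def Claim_equal_respuesta_156 : Prop := ∀ (n : Int) (x : String), Dom_respuesta_156 n x → Pre_respuesta_156 n x → Spec_respuesta_156 n x (respuesta_156 n x)

-- ===== LEMMAS AND PROOFS =====

-- triangular number i*(i+1)//2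
def pvT (i : Int) : Int := PySem.Int.floordiv (i * (i + 1)) 2

lemma pvT_eq (i : Int) : pvT i = i * (i + 1) / 2 := by
  unfold pvT
  rw [PySem.Int.floordiv_eq_ediv_of_pos (by norm_num)]

lemma pvT_succ (i : Int) : pvT (i + 1) = pvT i + (i + 1) := by
  obtain ⟨q, hq⟩ := Int.even_mul_succ_self i
  have h1 : (i + 1) * (i + 1 + 1) = i * (i + 1) + 2 * (i + 1) := by ring
  rw [pvT_eq, pvT_eq, h1, hq]
  omega

lemma pvMod9 (a : Int) : PySem.Int.mod a 9 = a % 9 :=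
  PySem.Int.mod_eq_emod_of_pos (by norm_num)

-- the digits of one row, starting value s ≡ base (mod 9)
def pvRowDigits (s : Int) (c : Nat) : List Char :=
  ((List.range c).map (fun (i : Nat) =>
    pvPick "123456789".toList (PySem.Int.mod (s + pvT (i : Int)) 9) ++ [' '])).flatten

lemma pvRowDigits_congr (s s' : Int) (c : Nat) (h : s % 9 = s' % 9) :
    pvRowDigits s c = pvRowDigits s' c := by
  unfold pvRowDigits
  congr 1
  apply List.map_congr_left
  intro i _
  congr 2
  rw [pvMod9, pvMod9]
  omega

-- inner loop of A = row digits, with the end state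
lemma pvInner (c : Nat) (res : List Char) (s : Int) (h0 : 0 ≤ s) (h9 : s < 9) :
    (PySem.List.pyRange 1 ((c : Int) + 1) 1).foldl
      (fun (t : List Char × Int) i =>
        (t.1 ++ pvPick "123456789".toList t.2 ++ [' '],
         PySem.Int.mod (t.2 + i) (PySem.Chars.len "123456789".toList)))
      (res, s)
    = (res ++ pvRowDigits s c, PySem.Int.mod (s + pvT (c : Int)) 9) := by
  induction c generalizing res with
  | zero =>
      rw [PySem.List.pyRange_one_eq_nil (by norm_num)]
      simp [pvRowDigits, pvT, PySem.Int.floordiv]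
      omega
  | succ c ih =>
      have hsplit : PySem.List.pyRange 1 ((c : Int) + 1 + 1) 1
          = PySem.List.pyRange 1 ((c : Int) + 1) 1 ++ [(c : Int) + 1] := by
        have := PySem.List.pyRange_one_succ_right (a := 1) (b := (c : Int) + 1) (by omega)
        simpa using this
      have hc : ((c + 1 : Nat) : Int) = (c : Int) + 1 := by push_cast; ring
      rw [hc, hsplit, List.foldl_append, ih res]
      simp only [List.foldl_cons, List.foldl_nil]
      rw [Prod.mk.injEq]
      constructor
      · show res ++ pvRowDigits s c ++ _ ++ _ = res ++ pvRowDigits s (c + 1)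
        unfold pvRowDigits
        rw [List.range_succ, List.map_append, List.flatten_append]
        simp only [List.map_cons, List.map_nil, List.flatten_cons, List.flatten_nil,
          List.append_nil, List.append_assoc]
      · show PySem.Int.mod (PySem.Int.mod (s + pvT (c : Int)) 9 + ((c : Int) + 1))
            (PySem.Chars.len "123456789".toList) = PySem.Int.mod (s + pvT ((c : Int) + 1)) 9
        have hlen : PySem.Chars.len "123456789".toList = 9 := rfl
        rw [hlen, pvT_succ, pvMod9, pvMod9, pvMod9]
        omega

-- one row of B, as produced for row index r of an m-row triangle with start digit k
def pvRowB (k m : Int) (r : Int) : List Char :=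
  (((PySem.List.pyRange 0 (m - r) 1).map (fun i =>
      pvPick "123456789".toList
        (PySem.Int.mod (k + PySem.Int.floordiv ((r + 1) * (r + 2)) 2 - 1
                        + PySem.Int.floordiv (i * (i + 1)) 2) 9) ++ [' '])).flatten)
    ++ ['\n']

lemma pvRowB_eq (k m : Int) (r : Nat) (c : Nat) (hc : m - (r : Int) = (c : Nat)) :
    pvRowB k m (r : Int)
    = pvRowDigits (k + pvT ((r : Int) + 1) - 1) c ++ ['\n'] := by
  unfold pvRowB pvRowDigits
  congr 1
  rw [hc, PySem.List.pyRange_zero_natCast, List.map_map]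
  congr 1

-- outer loop of A = concatenation of B's rows
lemma pvOuter (k : Int) (m : Int) (c : Nat) :
    ∀ (r0 : Nat) (res : List Char), ((r0 : Int) + (c : Int) = m) →
    ((PySem.List.pyRange ((r0 : Int) + 2) ((r0 : Int) + 2 + (c : Int)) 1).foldl
      (fun (st : List Char × Int × Int) j =>
        let inner := (PySem.List.pyRange 1 (st.2.2 + 1) 1).foldl
          (fun (t : List Char × Int) i =>
            (t.1 ++ pvPick "123456789".toList t.2 ++ [' '],
             PySem.Int.mod (t.2 + i) (PySem.Chars.len "123456789".toList)))
          (st.1, st.2.1)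
        (inner.1 ++ ['\n'],
         PySem.Int.mod (st.2.1 + j) (PySem.Chars.len "123456789".toList),
         st.2.2 - 1))
      (res, PySem.Int.mod (k + pvT ((r0 : Int) + 1) - 1) 9, m - (r0 : Int))).1
    = res ++ ((PySem.List.pyRange (r0 : Int) m 1).map (pvRowB k m)).flatten := by
  induction c with
  | zero =>
      intro r0 res hr
      rw [PySem.List.pyRange_one_eq_nil (by omega), PySem.List.pyRange_one_eq_nil (by omega)]
      simp
  | succ c ih =>
      intro r0 res hr
      have hcons : PySem.List.pyRange ((r0 : Int) + 2) ((r0 : Int) + 2 + ((c : Nat) + 1 : Nat)) 1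
          = ((r0 : Int) + 2) :: PySem.List.pyRange ((r0 : Int) + 3) ((r0 : Int) + 3 + (c : Int)) 1 := by
        rw [PySem.List.pyRange_one_cons (by push_cast; omega)]
        congr 1 <;> push_cast <;> ring_nf
      rw [hcons, List.foldl_cons]
      have hmod0 : 0 ≤ PySem.Int.mod (k + pvT ((r0 : Int) + 1) - 1) 9 :=
        PySem.Int.mod_nonneg _ (by norm_num)
      have hmod9 : PySem.Int.mod (k + pvT ((r0 : Int) + 1) - 1) 9 < 9 :=
        PySem.Int.mod_lt _ (by norm_num)
      have hmr : m - (r0 : Int) + 1 = ((c + 1 : Nat) : Int) + 1 := by push_cast at hr ⊢; omega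
      rw [hmr, pvInner (c + 1) res _ hmod0 hmod9]
      have hnum : PySem.Int.mod
          (PySem.Int.mod (k + pvT ((r0 : Int) + 1) - 1) 9 + ((r0 : Int) + 2))
          (PySem.Chars.len "123456789".toList)
          = PySem.Int.mod (k + pvT (((r0 + 1 : Nat) : Int) + 1) - 1) 9 := by
        have hlen : PySem.Chars.len "123456789".toList = 9 := rfl
        have ht : pvT (((r0 + 1 : Nat) : Int) + 1) = pvT ((r0 : Int) + 1) + ((r0 : Int) + 2) := by
          have := pvT_succ ((r0 : Int) + 1)
          push_cast
          push_cast at this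
          linarith [this]
        rw [hlen, ht, pvMod9, pvMod9, pvMod9]
        omega
      have hmx : m - (r0 : Int) - 1 = m - ((r0 + 1 : Nat) : Int) := by push_cast; ring
      simp only [hnum, hmx]
      have := ih (r0 + 1) (res ++ pvRowDigits (PySem.Int.mod (k + pvT ((r0 : Int) + 1) - 1) 9) (c + 1) ++ ['\n'])
        (by push_cast at hr ⊢; omega)
      have hrange : PySem.List.pyRange (((r0 + 1 : Nat) : Int) + 2) (((r0 + 1 : Nat) : Int) + 2 + (c : Int)) 1
          = PySem.List.pyRange ((r0 : Int) + 3) ((r0 : Int) + 3 + (c : Int)) 1 := by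
        congr 1 <;> (push_cast; ring_nf)
      rw [hrange] at this
      rw [this]
      have hrowsplit : PySem.List.pyRange (r0 : Int) m 1
          = (r0 : Int) :: PySem.List.pyRange ((r0 : Int) + 1) m 1 := by
        rw [PySem.List.pyRange_one_cons (by push_cast at hr ⊢; omega)]
      have hpc : ((r0 + 1 : Nat) : Int) = (r0 : Int) + 1 := by push_cast; ring
      rw [hpc, hrowsplit]
      have hrow : pvRowB k m (r0 : Int)
          = pvRowDigits (k + pvT ((r0 : Int) + 1) - 1) (c + 1) ++ ['\n'] := by
        apply pvRowB_eq
        push_cast at hr ⊢; omega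
      simp only [List.map_cons, List.flatten_cons, hrow]
      rw [pvRowDigits_congr (PySem.Int.mod (k + pvT ((r0 : Int) + 1) - 1) 9)
        (k + pvT ((r0 : Int) + 1) - 1) (c + 1) (by rw [pvMod9]; omega)]
      simp [List.append_assoc]

lemma pvFind_bounds (x : String) (h : PySem.Str.isIn x "123456789" = true) :
    0 ≤ PySem.Chars.find "123456789".toList x.toList ∧
    PySem.Chars.find "123456789".toList x.toList < 9 := by
  have hin : PySem.Chars.isIn x.toList "123456789".toList = true := by
    have := (PySem.Str.isIn_iff_infix (sub := x) (s := "123456789")).mp h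
    exact (PySem.Chars.isIn_iff_infix _ _).mpr this
  have hnonneg : 0 ≤ PySem.Chars.find "123456789".toList x.toList := by
    rw [PySem.Chars.find_nonneg_iff]
    exact (PySem.Chars.isIn_iff_infix _ _).mp hin
  refine ⟨hnonneg, ?_⟩
  by_contra hlt
  replace hlt := not_lt.mp hlt
  have hle : PySem.Chars.find "123456789".toList x.toList ≤ 9 := by
    have := PySem.Chars.find_le_length (s := "123456789".toList) (sub := x.toList)
    simpa using this
  have h9 : PySem.Chars.find "123456789".toList x.toList = 9 := le_antisymm hle hlt
  have hspec := (PySem.Chars.find_spec (s := "123456789".toList) (sub := x.toList) hnonneg).1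
  rw [h9] at hspec
  have hdrop : ("123456789".toList).drop ((9 : Int).toNat) = [] := rfl
  rw [hdrop] at hspec
  have hxnil : x.toList = [] := List.prefix_nil.mp hspec
  rw [hxnil] at h9
  rw [PySem.Chars.find_nil] at h9
  norm_num at h9

-- ===== VERDICT (by name: the statement is the Claim_ definition above) =====
theorem respuesta_156_spec : Claim_equal_respuesta_156 := by
  intro n x _ hpre
  simp only [Spec_respuesta_156, respuesta_156, respuesta_156_alt]
  obtain ⟨hk0, hk9⟩ := pvFind_bounds x hpre
  set k := PySem.Chars.find "123456789".toList x.toList with hk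
  by_cases hn : n ≤ 0
  · rw [PySem.List.pyRange_one_eq_nil (by omega), PySem.List.pyRange_one_eq_nil (by omega)]
    simp
  · replace hn := lt_of_not_ge hn
    have hc : ((n.toNat : Int)) = n := Int.toNat_of_nonneg (by omega)
    have hstart : k = PySem.Int.mod (k + pvT ((0 : Nat) + 1) - 1) 9 := by
      have : pvT ((0 : Nat) + 1) = 1 := by rw [pvT_eq]; norm_num
      rw [this, pvMod9]
      omega
    have hout := pvOuter k n n.toNat 0 [] (by push_cast; omega)
    have hr2 : PySem.List.pyRange ((0 : Nat) + 2) (((0 : Nat) : Int) + 2 + (n.toNat : Int)) 1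
        = PySem.List.pyRange 2 (n + 2) 1 := by
      congr 1 <;> push_cast <;> omega
    rw [hr2] at hout
    have hm0 : n - ((0 : Nat) : Int) = n := by push_cast; ring
    rw [hm0] at hout
    rw [← hstart] at hout
    refine ?_
    show String.ofList (((PySem.List.pyRange 2 (n + 2) 1).foldl
      (fun (st : List Char × Int × Int) j =>
        let inner := (PySem.List.pyRange 1 (st.2.2 + 1) 1).foldl
          (fun (t : List Char × Int) i =>
            (t.1 ++ pvPick "123456789".toList t.2 ++ [' '],
             PySem.Int.mod (t.2 + i) (PySem.Chars.len "123456789".toList)))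
          (st.1, st.2.1)
        (inner.1 ++ ['\n'],
         PySem.Int.mod (st.2.1 + j) (PySem.Chars.len "123456789".toList),
         st.2.2 - 1))
      ([], k, n)).1) = _
    rw [hout]
    simp only [List.nil_append]
    congr 1
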